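-- pv_equiv track=rewrite | github.com/TomDufall/prog-puzzles | aoc/2021/17/solution.py | check_intercept_y
-- ===== SOURCE A (Python) =====
-- def check_intercept_y(y_min, y_max, vel) -> bool:
--     y = 0
--     if y_min <= y <= y_max:
--         return True
--     while vel > 0 or y > y_max:
--         y += vel
--         if y_min <= y <= y_max:
--             return True
--         vel -= 1
--     return False
-- ===== SOURCE B (Python) =====
-- def check_intercept_y(y_min, y_max, vel) -> bool:
--     # Closed form: the positions visited are exactly T(vel) - T(j) for integers
--     # j >= j0 (T = triangular number), so search for a triangular number in the
--     # interval [T(vel) - y_max, T(vel) - y_min] with index >= j0, by binary search.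
--     m = vel * (vel + 1) // 2
--     j0 = -vel - 1 if vel < 0 else 0
--     u = m - y_min
--     if u < 0:
--         return False
--     lo, hi = 0, u + 1  # invariant: T(lo) <= u < T(hi); ends with lo = max j with T(j) <= u
--     while hi - lo > 1:
--         mid = (lo + hi) // 2
--         if mid * (mid + 1) // 2 <= u:
--             lo = mid
--         else:
--             hi = mid
--     return lo >= j0 and lo * (lo + 1) // 2 >= m - y_max
-- ===== Notes on version B (the rewrite author's own statement) =====
-- stated objective: faster
-- what changed: Replaces A's step-by-step trajectory simulation by a closed form: the positions visited are exactly T(vel) - T(j) for triangular numbers T with index j >= max(0, -vel-1), so B binary-searches for a triangular number in the shifted band [T(vel)-y_max, T(vel)-y_min].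
import Mathlib
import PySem

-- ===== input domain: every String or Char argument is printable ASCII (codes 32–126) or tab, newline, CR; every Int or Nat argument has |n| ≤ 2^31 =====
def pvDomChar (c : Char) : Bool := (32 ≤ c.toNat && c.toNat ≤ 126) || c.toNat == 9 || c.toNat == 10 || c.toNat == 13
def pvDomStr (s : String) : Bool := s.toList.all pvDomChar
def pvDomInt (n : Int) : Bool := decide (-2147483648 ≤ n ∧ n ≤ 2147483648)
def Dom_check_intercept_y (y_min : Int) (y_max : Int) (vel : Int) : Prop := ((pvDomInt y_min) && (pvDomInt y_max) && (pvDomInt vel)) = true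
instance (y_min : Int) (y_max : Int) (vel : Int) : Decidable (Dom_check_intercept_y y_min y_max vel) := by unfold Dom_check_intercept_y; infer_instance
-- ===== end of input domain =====

-- B replaces A's step-by-step simulation by a closed form: positions are T(vel) - T(j),
-- so it binary-searches for a triangular number in the shifted band (alternative/faster).

-- ===== PORT A =====
-- helper used only for the termination measure of A's while loop
def pvTriN (n : Nat) : Nat := n * (n + 1) / 2

-- A's while loop, state (y, vel); the Nat argument is plain fuel (it only makes the
-- recursion structural; pvLoopA passes an amount proved sufficient in pvLoopAF_char)
def pvLoopAF : Nat → Int → Int → Int → Int → Bool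
  | 0, _, _, _, _ => false
  | fuel + 1, y_min, y_max, y, vel =>
    if vel > 0 ∨ y > y_max then
      if y_min ≤ y + vel ∧ y + vel ≤ y_max then true
      else pvLoopAF fuel y_min y_max (y + vel) (vel - 1)
    else false

-- fuel bound: a strictly decreasing measure of the loop state, plus one
def pvFuelA (y_max y vel : Int) : Nat :=
  2 * ((y - y_max).toNat + pvTriN vel.toNat) + (vel + 1).toNat + 1

def pvLoopA (y_min : Int) (y_max : Int) (y : Int) (vel : Int) : Bool :=
  pvLoopAF (pvFuelA y_max y vel) y_min y_max y vel

def check_intercept_y (y_min : Int) (y_max : Int) (vel : Int) : Bool :=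
  if y_min ≤ 0 ∧ 0 ≤ y_max then true
  else pvLoopA y_min y_max 0 vel

-- ===== PORT B =====
-- binary search for the largest lo with lo*(lo+1)//2 ≤ u (invariant T(lo) ≤ u < T(hi));
-- the Nat argument is plain fuel making the recursion structural (it halves the gap each
-- step, so the gap itself is a sufficient amount, proved in pvBsearchF_spec)
def pvBsearchF : Nat → Int → Int → Int → Int
  | 0, _, lo, _ => lo
  | fuel + 1, u, lo, hi =>
    if hi - lo > 1 then
      let mid := PySem.Int.floordiv (lo + hi) 2
      if PySem.Int.floordiv (mid * (mid + 1)) 2 ≤ u then pvBsearchF fuel u mid hi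
      else pvBsearchF fuel u lo mid
    else lo

def pvBsearch (u : Int) (lo : Int) (hi : Int) : Int :=
  pvBsearchF (hi - lo).toNat u lo hi

def check_intercept_y_alt (y_min : Int) (y_max : Int) (vel : Int) : Bool :=
  let m := PySem.Int.floordiv (vel * (vel + 1)) 2
  let j0 := if vel < 0 then -vel - 1 else 0
  let u := m - y_min
  if u < 0 then false
  else
    let lo := pvBsearch u 0 (u + 1)
    decide (lo ≥ j0 ∧ PySem.Int.floordiv (lo * (lo + 1)) 2 ≥ m - y_max)

-- ===== PRECONDITION & SPEC =====
def Spec_check_intercept_y (y_min : Int) (y_max : Int) (vel : Int) (out : Bool) : Prop := out = check_intercept_y_alt y_min y_max vel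
instance (y_min : Int) (y_max : Int) (vel : Int) (out : Bool) : Decidable (Spec_check_intercept_y y_min y_max vel out) := by unfold Spec_check_intercept_y; infer_instance

-- ===== CLAIM (what is proved, stated in full; the proofs are below) =====
def Claim_equal_check_intercept_y : Prop := ∀ (y_min : Int) (y_max : Int) (vel : Int), Dom_check_intercept_y y_min y_max vel → Spec_check_intercept_y y_min y_max vel (check_intercept_y y_min y_max vel)

-- ===== LEMMAS AND PROOFS =====
theorem pvTriN_succ (n : Nat) : pvTriN (n + 1) = pvTriN n + (n + 1) := by
  unfold pvTriN
  have h : (n + 1) * (n + 1 + 1) = n * (n + 1) + (n + 1) * 2 := by ring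
  rw [h, Nat.add_mul_div_right _ _ (by omega : 0 < 2)]

-- triangular numbers over Int
def triI (n : Int) : Int := n * (n + 1) / 2

theorem two_triI (n : Int) : 2 * triI n = n * (n + 1) := by
  unfold triI
  have h : (2 : Int) ∣ n * (n + 1) := (Int.even_mul_succ_self n).two_dvd
  exact Int.mul_ediv_cancel' h

theorem triI_nonneg {n : Int} : 0 ≤ triI n := by
  have h := two_triI n
  nlinarith [mul_self_nonneg (2 * n + 1)]

theorem triI_step (n : Int) : triI n - triI (n - 1) = n := by
  have h1 := two_triI n
  have h2 := two_triI (n - 1)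
  nlinarith

theorem triI_refl (w : Int) : triI w = triI (-w - 1) := by
  have h1 := two_triI w
  have h2 := two_triI (-w - 1)
  nlinarith

theorem triI_mono {a b : Int} (ha : 0 ≤ a) (hab : a ≤ b) : triI a ≤ triI b := by
  have h1 := two_triI a
  have h2 := two_triI b
  nlinarith

theorem triI_anti {a b : Int} (hb : b ≤ 0) (hab : a ≤ b) : triI b ≤ triI a := by
  have h1 := two_triI a
  have h2 := two_triI b
  rcases le_or_gt (a + b + 1) 0 with h | h
  · nlinarith [mul_nonneg (by omega : (0:Int) ≤ b - a) (by omega : (0:Int) ≤ -(a + b + 1))]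
  · have ha0 : a = 0 := by omega
    have hb0 : b = 0 := by omega
    subst ha0; subst hb0; omega

theorem floordiv_tri (n : Int) : PySem.Int.floordiv (n * (n + 1)) 2 = triI n :=
  PySem.Int.floordiv_eq_ediv_of_pos (by omega)

-- the fuel measure strictly decreases on every loop step
theorem pvMu_dec (y_max y vel : Int) (hg : vel > 0 ∨ y > y_max) :
    2 * ((y + vel - y_max).toNat + pvTriN (vel - 1).toNat) + (vel - 1 + 1).toNat <
      2 * ((y - y_max).toNat + pvTriN vel.toNat) + (vel + 1).toNat := by
  rcases lt_trichotomy vel 0 with hv | hv | hv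
  · have h1 : (vel - 1).toNat = 0 := by omega
    have h2 : vel.toNat = 0 := by omega
    have hy : y > y_max := by omega
    simp only [h1, h2]
    unfold pvTriN
    simp only [Nat.zero_mul, Nat.zero_div]
    omega
  · subst hv
    have h1 : ((0:Int) - 1).toNat = 0 := rfl
    have h2 : (0:Int).toNat = 0 := rfl
    simp only [h1, h2]
    unfold pvTriN
    simp only [Nat.zero_mul, Nat.zero_div]
    omega
  · have h1 : vel.toNat = (vel - 1).toNat + 1 := by omega
    have h2 : pvTriN vel.toNat = pvTriN (vel - 1).toNat + vel.toNat := by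
      rw [h1, pvTriN_succ]
    omega

-- characterization of A's loop: from a state (y, vel) not already in the band,
-- it returns true iff some strictly later position y + triI vel - triI (vel - k) is in the band
theorem pvLoopAF_char (y_min y_max : Int) :
    ∀ (fuel : ℕ) (y vel : Int),
      2 * ((y - y_max).toNat + pvTriN vel.toNat) + (vel + 1).toNat < fuel →
      ¬ (y_min ≤ y ∧ y ≤ y_max) →
      (pvLoopAF fuel y_min y_max y vel = true ↔
        ∃ k : ℕ, 1 ≤ k ∧ y_min ≤ y + triI vel - triI (vel - k) ∧ y + triI vel - triI (vel - k) ≤ y_max) := by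
  intro fuel
  induction fuel with
  | zero => intro y vel hf _; exact absurd hf (by omega)
  | succ n ih =>
    intro y vel hf hy
    by_cases hg : vel > 0 ∨ y > y_max
    · by_cases hb : y_min ≤ y + vel ∧ y + vel ≤ y_max
      · simp only [pvLoopAF, if_pos hg, if_pos hb]
        have hs := triI_step vel
        refine iff_of_true trivial ⟨1, le_refl 1, ?_, ?_⟩ <;> (push_cast; omega)
      · simp only [pvLoopAF, if_pos hg, if_neg hb]
        have hmu := pvMu_dec y_max y vel hg
        rw [ih (y + vel) (vel - 1) (by omega) hb]
        have hs := triI_step vel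
        constructor
        · rintro ⟨k, hk, h1, h2⟩
          have e : vel - 1 - (k : Int) = vel - ((k : Int) + 1) := by ring
          rw [e] at h1 h2
          refine ⟨k + 1, by omega, ?_, ?_⟩ <;> (push_cast; omega)
        · rintro ⟨k, hk, h1, h2⟩
          rcases Nat.lt_or_ge k 2 with hk2 | hk2
          · -- k = 1: the position is y + vel, contradicting hb
            have hk1 : k = 1 := by omega
            subst hk1
            push_cast at h1 h2
            exact absurd ⟨by omega, by omega⟩ hb
          · refine ⟨k - 1, by omega, ?_, ?_⟩ <;>
            · have e : vel - 1 - ((k - 1 : ℕ) : Int) = vel - (k : Int) := by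
                push_cast [Nat.cast_sub (by omega : 1 ≤ k)]; ring
              rw [e]
              omega
    · simp only [pvLoopAF, if_neg hg]
      refine iff_of_false (by simp) ?_
      rintro ⟨k, hk, h1, h2⟩
      have ha := triI_anti (by omega : vel ≤ 0) (by omega : vel - (k : Int) ≤ vel)
      omega

theorem loopA_char (y_min y_max : Int) :
    ∀ y vel : Int, ¬ (y_min ≤ y ∧ y ≤ y_max) →
      (pvLoopA y_min y_max y vel = true ↔
        ∃ k : ℕ, 1 ≤ k ∧ y_min ≤ y + triI vel - triI (vel - k) ∧ y + triI vel - triI (vel - k) ≤ y_max) := by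
  intro y vel hy
  exact pvLoopAF_char y_min y_max (pvFuelA y_max y vel) y vel (by unfold pvFuelA; omega) hy

-- A returns true iff some position (including the start 0) is in the band
theorem A_char (y_min y_max vel : Int) :
    check_intercept_y y_min y_max vel = true ↔
      ∃ k : ℕ, y_min ≤ triI vel - triI (vel - k) ∧ triI vel - triI (vel - k) ≤ y_max := by
  unfold check_intercept_y
  by_cases h0 : y_min ≤ 0 ∧ 0 ≤ y_max
  · rw [if_pos h0]
    refine iff_of_true rfl ⟨0, ?_, ?_⟩ <;> (push_cast; rw [sub_zero]; omega)
  · rw [if_neg h0, loopA_char y_min y_max 0 vel h0]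
    constructor
    · rintro ⟨k, hk, h1, h2⟩
      exact ⟨k, by omega, by omega⟩
    · rintro ⟨k, h1, h2⟩
      rcases Nat.eq_zero_or_pos k with hk0 | hk1
      · subst hk0
        push_cast at h1 h2
        rw [sub_zero] at h1 h2
        exact absurd ⟨by omega, by omega⟩ h0
      · exact ⟨k, hk1, by omega, by omega⟩

-- the reachable positions are exactly triI vel - triI j for j ≥ j0
theorem Q_char (y_min y_max vel : Int) :
    (∃ k : ℕ, y_min ≤ triI vel - triI (vel - k) ∧ triI vel - triI (vel - k) ≤ y_max) ↔
      (∃ j : Int, (if vel < 0 then -vel - 1 else 0) ≤ j ∧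
        triI vel - y_max ≤ triI j ∧ triI j ≤ triI vel - y_min) := by
  constructor
  · rintro ⟨k, h1, h2⟩
    by_cases hw : 0 ≤ vel - (k : Int)
    · refine ⟨vel - (k : Int), ?_, by omega, by omega⟩
      split_ifs <;> omega
    · have hr := triI_refl (vel - (k : Int))
      refine ⟨-(vel - (k : Int)) - 1, ?_, by omega, by omega⟩
      split_ifs <;> omega
  · rintro ⟨j, hj0, hL, hU⟩
    have hj : 0 ≤ j := by split_ifs at hj0 <;> omega
    by_cases hjv : j ≤ vel
    · refine ⟨(vel - j).toNat, ?_, ?_⟩ <;>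
      · have e : vel - (((vel - j).toNat : ℕ) : Int) = j := by omega
        rw [e]; omega
    · have hw : -j - 1 ≤ vel := by split_ifs at hj0 <;> omega
      have hr := triI_refl j
      refine ⟨(vel + j + 1).toNat, ?_, ?_⟩ <;>
      · have e : vel - (((vel + j + 1).toNat : ℕ) : Int) = -j - 1 := by omega
        rw [e]; omega

theorem triI_zero : triI 0 = 0 := by decide

theorem pvBsearchF_spec (u : Int) :
    ∀ (fuel : ℕ) (lo hi : Int), (hi - lo).toNat ≤ fuel →
      0 ≤ lo → lo < hi → triI lo ≤ u → u < triI hi →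
      triI (pvBsearchF fuel u lo hi) ≤ u ∧ u < triI (pvBsearchF fuel u lo hi + 1) ∧
        lo ≤ pvBsearchF fuel u lo hi ∧ pvBsearchF fuel u lo hi < hi := by
  intro fuel
  induction fuel with
  | zero => intro lo hi hf h0 hlh _ _; exact absurd hf (by omega)
  | succ n ih =>
    intro lo hi hf h0 hlh hlou hhiu
    by_cases hgt : hi - lo > 1
    · have hm : PySem.Int.floordiv (lo + hi) 2 = (lo + hi) / 2 :=
        PySem.Int.floordiv_eq_ediv_of_pos (by omega)
      have hmid1 : lo < PySem.Int.floordiv (lo + hi) 2 := by rw [hm]; omega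
      have hmid2 : PySem.Int.floordiv (lo + hi) 2 < hi := by rw [hm]; omega
      by_cases hcond : PySem.Int.floordiv
          (PySem.Int.floordiv (lo + hi) 2 * (PySem.Int.floordiv (lo + hi) 2 + 1)) 2 ≤ u
      · have hleT := hcond
        rw [floordiv_tri] at hleT
        simp only [pvBsearchF, if_pos hgt, if_pos hcond]
        obtain ⟨a, b, c, d⟩ := ih (PySem.Int.floordiv (lo + hi) 2) hi (by omega) (by omega) hmid2 hleT hhiu
        exact ⟨a, b, by omega, d⟩
      · have hleT : u < triI (PySem.Int.floordiv (lo + hi) 2) := by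
          rw [floordiv_tri] at hcond; omega
        simp only [pvBsearchF, if_pos hgt, if_neg hcond]
        obtain ⟨a, b, c, d⟩ := ih lo (PySem.Int.floordiv (lo + hi) 2) (by omega) h0 hmid1 hlou hleT
        exact ⟨a, b, c, by omega⟩
    · simp only [pvBsearchF, if_neg hgt]
      have e : lo + 1 = hi := by omega
      rw [e]
      exact ⟨hlou, hhiu, le_refl lo, by omega⟩

theorem bsearch_spec (u : Int) :
    ∀ lo hi : Int, 0 ≤ lo → lo < hi → triI lo ≤ u → u < triI hi →
      triI (pvBsearch u lo hi) ≤ u ∧ u < triI (pvBsearch u lo hi + 1) ∧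
        lo ≤ pvBsearch u lo hi ∧ pvBsearch u lo hi < hi := by
  intro lo hi h0 hlh hlou hhiu
  exact pvBsearchF_spec u (hi - lo).toNat lo hi le_rfl h0 hlh hlou hhiu

theorem B_char (y_min y_max vel : Int) :
    check_intercept_y_alt y_min y_max vel = true ↔
      (∃ j : Int, (if vel < 0 then -vel - 1 else 0) ≤ j ∧
        triI vel - y_max ≤ triI j ∧ triI j ≤ triI vel - y_min) := by
  unfold check_intercept_y_alt
  simp only [floordiv_tri]
  by_cases hneg : triI vel - y_min < 0
  · rw [if_pos hneg]
    refine iff_of_false (by simp) ?_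
    rintro ⟨j, hj0, hL, hU⟩
    have hj : 0 ≤ j := by split_ifs at hj0 <;> omega
    have hnn : 0 ≤ triI j := triI_nonneg
    omega
  · rw [if_neg hneg]
    have h2 : triI vel - y_min < triI (triI vel - y_min + 1) := by
      have hd := two_triI (triI vel - y_min + 1)
      nlinarith [hd, hneg]
    obtain ⟨ha, hb, hc, hd⟩ := bsearch_spec (triI vel - y_min) 0 (triI vel - y_min + 1)
      le_rfl (by omega) (by rw [triI_zero]; omega) h2
    simp only [decide_eq_true_eq, ge_iff_le]
    constructor
    · rintro ⟨hj0, hL⟩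
      exact ⟨pvBsearch (triI vel - y_min) 0 (triI vel - y_min + 1), hj0, hL, ha⟩
    · rintro ⟨j, hj0, hL, hU⟩
      have hj : 0 ≤ j := by split_ifs at hj0 <;> omega
      have hjlo : j ≤ pvBsearch (triI vel - y_min) 0 (triI vel - y_min + 1) := by
        by_contra hgt
        have := triI_mono (by omega : (0:Int) ≤ pvBsearch (triI vel - y_min) 0 (triI vel - y_min + 1) + 1)
          (by omega : pvBsearch (triI vel - y_min) 0 (triI vel - y_min + 1) + 1 ≤ j)
        omega
      have := triI_mono hj hjlo
      exact ⟨by omega, by omega⟩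

-- ===== VERDICT (by name: the statement is the Claim_ definition above) =====
theorem check_intercept_y_spec : Claim_equal_check_intercept_y := by
  intro y_min y_max vel _
  unfold Spec_check_intercept_y
  have h := (A_char y_min y_max vel).trans ((Q_char y_min y_max vel).trans (B_char y_min y_max vel).symm)
  cases ha : check_intercept_y y_min y_max vel
  · cases hb : check_intercept_y_alt y_min y_max vel
    · rfl
    · exact absurd (h.mpr hb) (by simp [ha])
  · exact (h.mp ha).symm
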